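-- pv_equiv track=rewrite | github.com/adianliusie/comparative-assessment | src/comparative/loader.py | ratings_to_comparisons
-- ===== SOURCE A (Python) =====
-- from collections import defaultdict
--
-- def ratings_to_comparisons(ratings):
--     comparisons = defaultdict(dict)
--
--     for passage_id in ratings:
--         passage_scores = ratings[passage_id]
--         N = len(passage_scores)
--         for i in range(N):
--             for j in range(N):
--                 if i==j: continue
--                 score_1 = passage_scores[i]
--                 score_2 = passage_scores[j]
--
--                 # select the passage with the highest score
--                 if score_1 > score_2:
--                     score = 0
--                 elif score_2 > score_1:
--                     score = 1
--                 else: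
--                     score = -1
--
--                 # append input to dictionary
--                 comparisons[f"{passage_id}-{i}-{j}"] = score
--
--     comparisons = {k: v for k, v in sorted(comparisons.items())}
--     return comparisons
-- ===== SOURCE B (Python) =====
-- def ratings_to_comparisons(ratings):
--     out = {}
--     for pid, scores in ratings.items():
--         # indices sorted ascending by score: a later index in this order never
--         # has a smaller score, so only an equality test is needed per pair
--         rest = sorted(range(len(scores)), key=lambda k: scores[k])
--         while rest:
--             i, rest = rest[0], rest[1:]
--             for j in rest:
--                 if scores[i] == scores[j]:
--                     out[f"{pid}-{i}-{j}"] = -1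
--                     out[f"{pid}-{j}-{i}"] = -1
--                 else:
--                     out[f"{pid}-{i}-{j}"] = 1
--                     out[f"{pid}-{j}-{i}"] = 0
--     return dict(sorted(out.items()))
-- ===== Notes on version B (the rewrite author's own statement) =====
-- stated objective: alternative
-- what changed: B sorts each passage's indices by score once (stable sort) and then walks the sorted suffixes, so each pair needs only an equality test: a tie yields -1/-1, otherwise the earlier (lower-scored) index gets 1 and the later gets 0; A instead runs the full NxN grid with a three-way comparison per ordered pair. B accumulates in a plain dict and sorts the items once.
import Mathlib
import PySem

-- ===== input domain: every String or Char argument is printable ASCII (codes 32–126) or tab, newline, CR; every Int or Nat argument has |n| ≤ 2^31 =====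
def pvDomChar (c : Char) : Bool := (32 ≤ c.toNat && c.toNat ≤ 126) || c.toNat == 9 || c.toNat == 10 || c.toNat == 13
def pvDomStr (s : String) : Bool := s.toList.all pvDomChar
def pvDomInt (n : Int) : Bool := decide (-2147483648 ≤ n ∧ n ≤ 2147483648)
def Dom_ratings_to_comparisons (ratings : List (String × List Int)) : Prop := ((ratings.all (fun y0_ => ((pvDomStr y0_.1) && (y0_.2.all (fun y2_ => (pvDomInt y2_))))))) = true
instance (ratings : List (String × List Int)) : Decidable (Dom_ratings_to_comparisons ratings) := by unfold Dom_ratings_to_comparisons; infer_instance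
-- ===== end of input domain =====

-- B replaces A's full N×N grid with a three-way comparison per ordered pair by a sort-based
-- algorithm: per passage it sorts the indices by score once and walks the sorted suffixes,
-- deciding each pair with a single equality test (tie → -1/-1, else earlier index gets 1/0).

-- f"{passage_id}-{i}-{j}": built by hand on List Char; str(int) is PySem.Int.toChars, so this is exact
def pvKey (pid : String) (i j : Int) : String :=
  String.ofList (pid.toList ++ '-' :: (PySem.Int.toChars i ++ '-' :: PySem.Int.toChars j))

-- ===== PORT A =====
-- 'for passage_id in ratings: passage_scores = ratings[passage_id]' iterates the dict's items in order
def pvLoopA (ratings : List (String × List Int)) : PySem.Dict String Int :=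
  ratings.foldl (fun comparisons pr =>
    let passage_scores := pr.2
    let N : Int := PySem.List.len passage_scores
    (PySem.List.pyRange 0 N 1).foldl (fun comparisons i =>
      (PySem.List.pyRange 0 N 1).foldl (fun comparisons j =>
        if i = j then comparisons
        else
          let score_1 := PySem.List.pyGetD passage_scores i 0
          let score_2 := PySem.List.pyGetD passage_scores j 0
          let score : Int := if score_1 > score_2 then 0 else if score_2 > score_1 then 1 else -1
          comparisons.insert (pvKey pr.1 i j) score) comparisons) comparisons) PySem.Dict.empty

-- sorted(comparisons.items()): a dict's keys are all distinct, so Python's pair comparison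
-- never reaches the second component — sorting by the key alone is exact
def ratings_to_comparisons (ratings : List (String × List Int)) : List (String × Int) :=
  PySem.List.sorted (pvLoopA ratings).items (fun p => p.1)

-- ===== PORT B =====
-- rest = sorted(range(len(scores)), key=lambda k: scores[k])
def pvOrd (sc : List Int) : List Int :=
  PySem.List.sorted (PySem.List.pyRange 0 (PySem.List.len sc) 1) (fun k => PySem.List.pyGetD sc k 0)

-- the 'while rest:' loop: peel rest[0], compare it with each later index by equality only
def pvPassB (pid : String) (sc : List Int) : List Int → PySem.Dict String Int → PySem.Dict String Int
  | [], out => out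
  | i :: rest, out =>
    pvPassB pid sc rest
      (rest.foldl (fun out j =>
        if PySem.List.pyGetD sc i 0 = PySem.List.pyGetD sc j 0 then
          (out.insert (pvKey pid i j) (-1)).insert (pvKey pid j i) (-1)
        else
          (out.insert (pvKey pid i j) 1).insert (pvKey pid j i) 0) out)

def pvLoopB (ratings : List (String × List Int)) : PySem.Dict String Int :=
  ratings.foldl (fun out pr => pvPassB pr.1 pr.2 (pvOrd pr.2) out) PySem.Dict.empty

def ratings_to_comparisons_alt (ratings : List (String × List Int)) : List (String × Int) :=
  PySem.List.sorted (pvLoopB ratings).items (fun p => p.1)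

-- ===== PRECONDITION & SPEC =====
-- The parameter is a Python dict, whose keys are necessarily distinct; an association list with a
-- repeated passage id represents no dict, so such lists are outside the claim.
def Pre_ratings_to_comparisons (ratings : List (String × List Int)) : Prop :=
  (ratings.map Prod.fst).Nodup

instance (ratings : List (String × List Int)) : Decidable (Pre_ratings_to_comparisons ratings) := by
  unfold Pre_ratings_to_comparisons; infer_instance

def pvWitness_ratings_to_comparisons : (List (String × List Int)) :=
  [("a", [1, 2, 2]), ("b", [5])]

def Spec_ratings_to_comparisons (ratings : List (String × List Int)) (out : List (String × Int)) : Prop :=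
  out = ratings_to_comparisons_alt ratings

instance (ratings : List (String × List Int)) (out : List (String × Int)) : Decidable (Spec_ratings_to_comparisons ratings out) := by
  unfold Spec_ratings_to_comparisons; infer_instance

-- ===== CLAIM (what is proved, stated in full; the proofs are below) =====
def Claim_equal_ratings_to_comparisons : Prop := ∀ (ratings : List (String × List Int)), Dom_ratings_to_comparisons ratings → Pre_ratings_to_comparisons ratings → Spec_ratings_to_comparisons ratings (ratings_to_comparisons ratings)

-- ===== LEMMAS AND PROOFS =====

-- ---- abbreviations used only by the proofs ----

def pvR (N : Int) : List Int := PySem.List.pyRange 0 N 1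

-- the (i, j) pairs A's loops insert, in A's order
def pvPA (N : Int) : List (Int × Int) :=
  (pvR N).flatMap (fun i => ((pvR N).filter (fun j => decide (¬ i = j))).map (fun j => (i, j)))

-- the positional pairs of a list: (l[p], l[q]) for p < q, in B's visiting order
def pvPairsOf : List Int → List (Int × Int)
  | [] => []
  | i :: rest => rest.map (fun j => (i, j)) ++ pvPairsOf rest

-- those pairs, each expanded to both directions, in B's insertion order
def pvPBx (l : List Int) : List (Int × Int) := (pvPairsOf l).flatMap (fun p => [p, (p.2, p.1)])

def pvScore (sc : List Int) (i j : Int) : Int :=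
  if PySem.List.pyGetD sc i 0 > PySem.List.pyGetD sc j 0 then 0
  else if PySem.List.pyGetD sc j 0 > PySem.List.pyGetD sc i 0 then 1 else -1

def pvG (r : String × List Int) (p : Int × Int) : String × Int :=
  (pvKey r.1 p.1 p.2, pvScore r.2 p.1 p.2)

-- the two entries B writes for one visited pair
def pvEntries (pid : String) (sc : List Int) (p : Int × Int) : List (String × Int) :=
  if PySem.List.pyGetD sc p.1 0 = PySem.List.pyGetD sc p.2 0 then
    [(pvKey pid p.1 p.2, -1), (pvKey pid p.2 p.1, -1)]
  else
    [(pvKey pid p.1 p.2, 1), (pvKey pid p.2 p.1, 0)]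

def pvBlockA (r : String × List Int) : List (String × Int) :=
  (pvPA (PySem.List.len r.2)).map (pvG r)

def pvBlockB (r : String × List Int) : List (String × Int) :=
  (pvPairsOf (pvOrd r.2)).flatMap (pvEntries r.1 r.2)

-- ---- decimal digits: no '-' and injectivity ----

lemma pv_digitChar_inj (m n : Nat) (hm : m < 10) (hn : n < 10)
    (h : Nat.digitChar m = Nat.digitChar n) : m = n := by
  interval_cases m <;> interval_cases n <;> simp_all [Nat.digitChar]

lemma pv_toDigits_ne_nil (n : Nat) : Nat.toDigits 10 n ≠ [] := by
  rw [Nat.toDigits_eq_if (by norm_num)]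
  split <;> simp

lemma pv_toDigits_isDigit (n : Nat) : ∀ c ∈ Nat.toDigits 10 n, c.isDigit := by
  induction n using Nat.strong_induction_on with
  | _ n ih =>
    rw [Nat.toDigits_eq_if (by norm_num)]
    split
    · rename_i hlt
      intro c hc
      simp only [List.mem_singleton] at hc
      subst hc
      interval_cases n <;> decide
    · rename_i hge
      intro c hc
      rcases List.mem_append.mp hc with h | h
      · exact ih (n / 10) (by omega) c h
      · simp only [List.mem_singleton] at h
        subst h
        have : n % 10 < 10 := Nat.mod_lt _ (by norm_num)
        interval_cases h : n % 10 <;> decide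

lemma pv_toDigits_inj (m : Nat) : ∀ n, Nat.toDigits 10 m = Nat.toDigits 10 n → m = n := by
  induction m using Nat.strong_induction_on with
  | _ m ih =>
    intro n h
    rw [Nat.toDigits_eq_if (b := 10) (n := m) (by norm_num),
        Nat.toDigits_eq_if (b := 10) (n := n) (by norm_num)] at h
    split at h <;> split at h
    · rename_i hm hn
      exact pv_digitChar_inj m n hm hn (List.singleton_inj.mp h)
    · exfalso
      obtain ⟨c, t, hnil⟩ : ∃ c t, Nat.toDigits 10 (n / 10) = c :: t := by
        cases h' : Nat.toDigits 10 (n / 10) with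
        | nil => exact absurd h' (pv_toDigits_ne_nil _)
        | cons c t => exact ⟨c, t, rfl⟩
      rw [hnil] at h
      have hlen := congrArg List.length h
      simp at hlen
    · exfalso
      obtain ⟨c, t, hnil⟩ : ∃ c t, Nat.toDigits 10 (m / 10) = c :: t := by
        cases h' : Nat.toDigits 10 (m / 10) with
        | nil => exact absurd h' (pv_toDigits_ne_nil _)
        | cons c t => exact ⟨c, t, rfl⟩
      rw [hnil] at h
      have hlen := congrArg List.length h
      simp at hlen
    · rename_i hm hn
      obtain ⟨h1, h2⟩ := List.append_inj' h (by simp)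
      have hq : m / 10 = n / 10 := ih (m / 10) (by omega) (n / 10) h1
      have hr : m % 10 = n % 10 :=
        pv_digitChar_inj _ _ (Nat.mod_lt _ (by norm_num)) (Nat.mod_lt _ (by norm_num))
          (List.singleton_inj.mp h2)
      omega

lemma pv_toChars_nonneg (i : Int) (h : 0 ≤ i) :
    PySem.Int.toChars i = Nat.toDigits 10 i.toNat := by
  simp [PySem.Int.toChars, not_lt.mpr h]

lemma pv_dash_not_mem_toChars (i : Int) (h : 0 ≤ i) : '-' ∉ PySem.Int.toChars i := by
  rw [pv_toChars_nonneg i h]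
  intro hmem
  have := pv_toDigits_isDigit i.toNat '-' hmem
  simp [Char.isDigit] at this

lemma pv_toChars_inj (i j : Int) (hi : 0 ≤ i) (hj : 0 ≤ j)
    (h : PySem.Int.toChars i = PySem.Int.toChars j) : i = j := by
  rw [pv_toChars_nonneg i hi, pv_toChars_nonneg j hj] at h
  have := pv_toDigits_inj i.toNat j.toNat h
  omega

-- split a list at the first occurrence of c
lemma pv_split_first {α : Type} [DecidableEq α] (c : α) :
    ∀ (u u' v v' : List α), c ∉ u → c ∉ u' → u ++ c :: v = u' ++ c :: v' → u = u' ∧ v = v' := by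
  intro u
  induction u with
  | nil =>
    intro u' v v' _ hu' h
    cases u' with
    | nil => simpa using h
    | cons a t =>
      exfalso
      simp at h
      obtain ⟨h1, _⟩ := h
      exact hu' (by simp [h1])
  | cons a t ih =>
    intro u' v v' hu hu' h
    cases u' with
    | nil =>
      exfalso
      simp at h
      obtain ⟨h1, _⟩ := h
      exact hu (by simp [h1])
    | cons b t' =>
      simp only [List.cons_append, List.cons.injEq] at h
      obtain ⟨hab, h2⟩ := h
      have := ih t' v v' (fun hm => hu (List.mem_cons_of_mem _ hm)) (fun hm => hu' (List.mem_cons_of_mem _ hm)) h2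
      exact ⟨by simp [hab, this.1], this.2⟩

lemma pvKey_inj (p p' : String) (i j i' j' : Int) (hi : 0 ≤ i) (hj : 0 ≤ j)
    (hi' : 0 ≤ i') (hj' : 0 ≤ j') (h : pvKey p i j = pvKey p' i' j') :
    p = p' ∧ i = i' ∧ j = j' := by
  unfold pvKey at h
  have hl := String.ofList_inj.mp h
  have hrev := congrArg List.reverse hl
  simp only [List.reverse_append, List.reverse_cons, List.append_assoc] at hrev
  rw [show ∀ (x y : List Char), x ++ (['-'] ++ y) = x ++ '-' :: y from fun _ _ => rfl] at hrev
  rw [show ∀ (x y : List Char), x ++ (['-'] ++ y) = x ++ '-' :: y from fun _ _ => rfl] at hrev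
  have hJ : '-' ∉ (PySem.Int.toChars j).reverse := by
    simpa using pv_dash_not_mem_toChars j hj
  have hJ' : '-' ∉ (PySem.Int.toChars j').reverse := by
    simpa using pv_dash_not_mem_toChars j' hj'
  obtain ⟨h1, h2⟩ := pv_split_first '-' _ _ _ _ hJ hJ' hrev
  have hI : '-' ∉ (PySem.Int.toChars i).reverse := by
    simpa using pv_dash_not_mem_toChars i hi
  have hI' : '-' ∉ (PySem.Int.toChars i').reverse := by
    simpa using pv_dash_not_mem_toChars i' hi'
  obtain ⟨h3, h4⟩ := pv_split_first '-' _ _ _ _ hI hI' h2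
  refine ⟨?_, ?_, ?_⟩
  · exact String.toList_inj.mp (List.reverse_injective h4)
  · exact pv_toChars_inj i i' hi hi' (List.reverse_injective h3)
  · exact pv_toChars_inj j j' hj hj' (List.reverse_injective h1)

-- ---- the pair lists: membership, nodup, permutation ----

lemma pv_mem_pvPA (N : Int) (p : Int × Int) :
    p ∈ pvPA N ↔ 0 ≤ p.1 ∧ p.1 < N ∧ 0 ≤ p.2 ∧ p.2 < N ∧ p.1 ≠ p.2 := by
  unfold pvPA pvR
  simp only [List.mem_flatMap, List.mem_map, List.mem_filter, PySem.List.mem_pyRange_one,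
    decide_eq_true_eq]
  constructor
  · rintro ⟨i, hi, j, ⟨hj, hne⟩, rfl⟩
    exact ⟨hi.1, hi.2, hj.1, hj.2, fun h => hne h⟩
  · rintro ⟨h1, h2, h3, h4, h5⟩
    exact ⟨p.1, ⟨h1, h2⟩, p.2, ⟨⟨h3, h4⟩, h5⟩, rfl⟩

lemma pv_nodup_pvPA (N : Int) : (pvPA N).Nodup := by
  unfold pvPA
  rw [List.nodup_flatMap]
  refine ⟨fun i _ => ?_, ?_⟩
  · exact ((PySem.List.nodup_pyRange_one _ _).filter _).map (fun a b h => by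
      have := congrArg Prod.snd h
      simpa using this)
  · refine List.Pairwise.imp_of_mem ?_ (PySem.List.pairwise_lt_pyRange_one _ _)
    intro i i' _ _ hlt a ha ha'
    simp only [List.mem_map, List.mem_filter] at ha ha'
    obtain ⟨j, _, rfl⟩ := ha
    obtain ⟨j', _, h⟩ := ha'
    exact absurd (congrArg Prod.fst h).symm (by simp; omega)

lemma pv_pairsOf_coords : ∀ (l : List Int) (p : Int × Int), p ∈ pvPairsOf l → p.1 ∈ l ∧ p.2 ∈ l := by
  intro l
  induction l with
  | nil => intro p hp; simp [pvPairsOf] at hp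
  | cons x t ih =>
    intro p hp
    rcases List.mem_append.mp hp with h | h
    · obtain ⟨j, hj, rfl⟩ := List.mem_map.mp h
      exact ⟨by simp, by simp [hj]⟩
    · have := ih p h
      exact ⟨List.mem_cons_of_mem _ this.1, List.mem_cons_of_mem _ this.2⟩

lemma pv_pairsOf_rel {R : Int → Int → Prop} :
    ∀ (l : List Int), l.Pairwise R → ∀ p ∈ pvPairsOf l, R p.1 p.2 := by
  intro l
  induction l with
  | nil => intro _ p hp; simp [pvPairsOf] at hp
  | cons x t ih =>
    intro hpw p hp
    rw [List.pairwise_cons] at hpw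
    rcases List.mem_append.mp hp with h | h
    · obtain ⟨j, hj, rfl⟩ := List.mem_map.mp h
      exact hpw.1 j hj
    · exact ih hpw.2 p h

lemma pv_pvPBx_coords (l : List Int) (a : Int × Int) (h : a ∈ pvPBx l) : a.1 ∈ l ∧ a.2 ∈ l := by
  obtain ⟨q, hq, hm⟩ := List.mem_flatMap.mp h
  have hc := pv_pairsOf_coords l q hq
  simp only [List.mem_cons, List.not_mem_nil, or_false] at hm
  rcases hm with rfl | rfl
  · exact hc
  · exact ⟨hc.2, hc.1⟩

lemma pv_mem_pvPBx_of (a b : Int) :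
    ∀ l : List Int, l.Nodup → a ∈ l → b ∈ l → a ≠ b → (a, b) ∈ pvPBx l := by
  intro l
  induction l with
  | nil => simp
  | cons x t ih =>
    intro hnd ha hb hne
    rw [List.nodup_cons] at hnd
    have hsplit : pvPBx (x :: t)
        = (t.map (fun j => (x, j))).flatMap (fun p => [p, (p.2, p.1)]) ++ pvPBx t := by
      show (t.map (fun j => (x, j)) ++ pvPairsOf t).flatMap (fun p => [p, (p.2, p.1)]) = _
      rw [List.flatMap_append]
      rfl
    rw [hsplit, List.mem_append]
    rcases List.mem_cons.mp ha with rfl | hat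
    · left
      have hbt : b ∈ t := by
        rcases List.mem_cons.mp hb with h | h
        · exact absurd h.symm hne
        · exact h
      exact List.mem_flatMap.mpr ⟨(a, b), List.mem_map.mpr ⟨b, hbt, rfl⟩, by simp⟩
    · rcases List.mem_cons.mp hb with rfl | hbt
      · left
        exact List.mem_flatMap.mpr ⟨(b, a), List.mem_map.mpr ⟨a, hat, rfl⟩, by simp⟩
      · right
        exact ih hnd.2 hat hbt hne

lemma pv_mem_pvPBx (l : List Int) (hnd : l.Nodup) (a b : Int) :
    (a, b) ∈ pvPBx l ↔ a ∈ l ∧ b ∈ l ∧ a ≠ b := by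
  constructor
  · intro h
    have hc := pv_pvPBx_coords l (a, b) h
    obtain ⟨q, hq, hm⟩ := List.mem_flatMap.mp h
    have hqne : q.1 ≠ q.2 := pv_pairsOf_rel (R := (· ≠ ·)) l hnd q hq
    simp only [List.mem_cons, List.not_mem_nil, or_false] at hm
    rcases hm with rfl | h
    · exact ⟨hc.1, hc.2, hqne⟩
    · refine ⟨hc.1, hc.2, ?_⟩
      have h1 : a = q.2 := congrArg Prod.fst h
      have h2 : b = q.1 := congrArg Prod.snd h
      rw [h1, h2]
      exact hqne.symm
  · rintro ⟨h1, h2, h3⟩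
    exact pv_mem_pvPBx_of a b l hnd h1 h2 h3

lemma pv_nodup_pvPBx (l : List Int) (hnd : l.Nodup) : (pvPBx l).Nodup := by
  induction l with
  | nil => simp [pvPBx, pvPairsOf]
  | cons x t ih =>
    rw [List.nodup_cons] at hnd
    have hx := hnd.1
    have hsplit : pvPBx (x :: t)
        = t.flatMap (fun j => [(x, j), (j, x)]) ++ pvPBx t := by
      show (t.map (fun j => (x, j)) ++ pvPairsOf t).flatMap (fun p => [p, (p.2, p.1)]) = _
      rw [List.flatMap_append, List.flatMap_map]
      rfl
    rw [hsplit, List.nodup_append]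
    refine ⟨?_, ih hnd.2, ?_⟩
    · rw [List.nodup_flatMap]
      refine ⟨fun j hj => ?_, ?_⟩
      · have hxj : x ≠ j := fun h => hx (h ▸ hj)
        refine List.nodup_cons.mpr ⟨?_, List.nodup_singleton _⟩
        simp only [List.mem_singleton, Prod.mk.injEq]
        rintro ⟨h1, -⟩
        exact hxj h1
      · have hne : t.Pairwise (· ≠ ·) := hnd.2
        refine List.Pairwise.imp_of_mem ?_ hne
        intro j j' hj hj' hjj a ha ha'
        simp only [List.mem_cons, List.not_mem_nil, or_false] at ha ha'
        rcases ha with rfl | rfl <;> rcases ha' with h | h <;>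
          simp only [Prod.mk.injEq] at h
        · exact hjj h.2
        · exact hx (h.1 ▸ hj')
        · exact hx (h.1.symm ▸ hj)
        · exact hjj h.1
    · intro a ha a' ha' haa
      subst haa
      have hc := pv_pvPBx_coords t a ha'
      obtain ⟨j, hj, hm⟩ := List.mem_flatMap.mp ha
      simp only [List.mem_cons, List.not_mem_nil, or_false] at hm
      rcases hm with rfl | rfl
      · exact hx hc.1
      · exact hx hc.2

-- pvOrd is a permutation of range(N), hence nodup with the range's membership
lemma pv_ord_perm (sc : List Int) : (pvOrd sc).Perm (pvR (PySem.List.len sc)) :=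
  PySem.List.sorted_perm _ _ _

lemma pv_ord_nodup (sc : List Int) : (pvOrd sc).Nodup :=
  ((pv_ord_perm sc).nodup_iff).mpr (PySem.List.nodup_pyRange_one _ _)

lemma pv_perm_pvPBx_pvPA (sc : List Int) : (pvPBx (pvOrd sc)).Perm (pvPA (PySem.List.len sc)) := by
  rw [List.perm_ext_iff_of_nodup (pv_nodup_pvPBx _ (pv_ord_nodup sc)) (pv_nodup_pvPA _)]
  intro p
  obtain ⟨a, b⟩ := p
  have hm : ∀ x : Int, x ∈ pvOrd sc ↔ 0 ≤ x ∧ x < PySem.List.len sc := by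
    intro x
    rw [(pv_ord_perm sc).mem_iff]
    exact PySem.List.mem_pyRange_one
  simp only [pv_mem_pvPBx _ (pv_ord_nodup sc) a b, pv_mem_pvPA, hm]
  tauto

-- ---- B's entries are A's scores, thanks to the sort ----

lemma pv_entries_eq (r : String × List Int) (i j : Int)
    (hle : PySem.List.pyGetD r.2 i 0 ≤ PySem.List.pyGetD r.2 j 0) :
    pvEntries r.1 r.2 (i, j) = [pvG r (i, j), pvG r (j, i)] := by
  unfold pvEntries pvG pvScore
  dsimp only
  split_ifs <;> first | rfl | omega

lemma pv_blockB_eq_map (r : String × List Int) :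
    pvBlockB r = (pvPBx (pvOrd r.2)).map (pvG r) := by
  unfold pvBlockB pvPBx
  rw [List.map_flatMap]
  rw [List.flatMap_def, List.flatMap_def]
  refine congrArg List.flatten (List.map_congr_left ?_)
  intro p hp
  obtain ⟨a, b⟩ := p
  have hle : PySem.List.pyGetD r.2 a 0 ≤ PySem.List.pyGetD r.2 b 0 :=
    pv_pairsOf_rel (R := fun u v => PySem.List.pyGetD r.2 u 0 ≤ PySem.List.pyGetD r.2 v 0)
      (pvOrd r.2) (PySem.List.sorted_pairwise _ _) (a, b) hp
  rw [pv_entries_eq r a b hle]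
  simp

lemma pv_blockA_perm_blockB (r : String × List Int) : (pvBlockA r).Perm (pvBlockB r) := by
  rw [pv_blockB_eq_map]
  exact ((pv_perm_pvPBx_pvPA r.2).map (pvG r)).symm

-- ---- loop shapes: each port's dict is a fold of single inserts over its block ----

lemma pv_fold_shapeA (pid : String) (sc : List Int) (d : PySem.Dict String Int) :
    (PySem.List.pyRange 0 (PySem.List.len sc) 1).foldl (fun comparisons i =>
      (PySem.List.pyRange 0 (PySem.List.len sc) 1).foldl (fun comparisons j =>
        if i = j then comparisons
        else
          let score_1 := PySem.List.pyGetD sc i 0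
          let score_2 := PySem.List.pyGetD sc j 0
          let score : Int := if score_1 > score_2 then 0 else if score_2 > score_1 then 1 else -1
          comparisons.insert (pvKey pid i j) score) comparisons) d
    = (pvBlockA (pid, sc)).foldl (fun d q => d.insert q.1 q.2) d := by
  unfold pvBlockA
  rw [List.foldl_map]
  unfold pvPA
  rw [List.foldl_flatMap]
  simp only [List.foldl_map, pvG, pvR]
  apply PySem.List.foldl_congr_mem
  intro acc i _
  have hfil := PySem.List.foldl_ite_eq_foldl_filter (fun j => ¬ i = j)
    (fun (x : PySem.Dict String Int) y => x.insert (pvKey pid i y) (pvScore sc i y))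
    (PySem.List.pyRange 0 (PySem.List.len sc)) acc
  rw [← hfil]
  simp only [ite_not]
  rfl

lemma pv_loopA_shape (ratings : List (String × List Int)) :
    pvLoopA ratings =
      ratings.foldl (fun d r => (pvBlockA r).foldl (fun d q => d.insert q.1 q.2) d) PySem.Dict.empty := by
  unfold pvLoopA
  apply PySem.List.foldl_congr_mem
  intro d r _
  exact pv_fold_shapeA r.1 r.2 d

lemma pv_passB_shape (pid : String) (sc : List Int) :
    ∀ (l : List Int) (d : PySem.Dict String Int),
      pvPassB pid sc l d
        = ((pvPairsOf l).flatMap (pvEntries pid sc)).foldl (fun d q => d.insert q.1 q.2) d := by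
  intro l
  induction l with
  | nil => intro d; rfl
  | cons i rest ih =>
    intro d
    have hinner : rest.foldl (fun out j =>
        if PySem.List.pyGetD sc i 0 = PySem.List.pyGetD sc j 0 then
          (out.insert (pvKey pid i j) (-1)).insert (pvKey pid j i) (-1)
        else
          (out.insert (pvKey pid i j) 1).insert (pvKey pid j i) 0) d
      = ((rest.map (fun j => (i, j))).flatMap (pvEntries pid sc)).foldl
          (fun d q => d.insert q.1 q.2) d := by
      rw [List.flatMap_map, List.foldl_flatMap]
      apply PySem.List.foldl_congr_mem
      intro acc j _
      simp only [pvEntries]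
      split_ifs <;> rfl
    show pvPassB pid sc rest _ = _
    rw [ih, hinner]
    rw [show pvPairsOf (i :: rest) = rest.map (fun j => (i, j)) ++ pvPairsOf rest from rfl,
        List.flatMap_append, List.foldl_append]

lemma pv_loopB_shape (ratings : List (String × List Int)) :
    pvLoopB ratings =
      ratings.foldl (fun d r => (pvBlockB r).foldl (fun d q => d.insert q.1 q.2) d) PySem.Dict.empty := by
  unfold pvLoopB
  apply PySem.List.foldl_congr_mem
  intro d r _
  exact pv_passB_shape r.1 r.2 (pvOrd r.2) d

-- ---- items of a fold of fresh inserts ----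

lemma pv_items_foldl (P : String × List Int → List (String × Int)) :
    ∀ (rs : List (String × List Int)) (d : PySem.Dict String Int),
      (d.keys ++ (rs.flatMap P).map Prod.fst).Nodup →
      (rs.foldl (fun d r => (P r).foldl (fun d q => d.insert q.1 q.2) d) d).items
        = d.items ++ rs.flatMap P := by
  intro rs
  induction rs with
  | nil => intro d _; simp
  | cons r rs ih =>
    intro d h
    rw [List.flatMap_cons, List.map_append] at h
    have hfresh : ∀ a ∈ P r, d.contains a.1 = false := by
      intro a ha
      rw [PySem.Dict.contains_eq_decide_mem_keys]
      simp only [decide_eq_false_iff_not]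
      intro hk
      have hdisj := (List.nodup_append.mp h).2.2
      exact hdisj a.1 hk a.1 (List.mem_append_left _ (List.mem_map_of_mem ha)) rfl
    have hmapnodup : ((P r).map Prod.fst).Nodup :=
      ((List.nodup_append.mp (List.nodup_append.mp h).2.1).1)
    have hitems := PySem.Dict.items_foldl_insert_fresh (P r) Prod.fst Prod.snd d hfresh hmapnodup
    have heta : (P r).map (fun a => (a.1, a.2)) = P r := by simp
    rw [heta] at hitems
    rw [List.foldl_cons]
    have hkeys2 : ((P r).foldl (fun d q => d.insert q.1 q.2) d).keys
        = d.keys ++ (P r).map Prod.fst := by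
      show (List.map _ _) = _
      rw [show ((P r).foldl (fun d q => d.insert q.1 q.2) d).items
            = d.items ++ P r from hitems]
      rw [List.map_append]
      rfl
    rw [ih _ (by rw [hkeys2, List.append_assoc]; exact h)]
    rw [hitems, List.flatMap_cons, List.append_assoc]

-- ---- key nodup ----

lemma pv_keysA_nodup (ratings : List (String × List Int))
    (h : (ratings.map Prod.fst).Nodup) :
    ((ratings.flatMap pvBlockA).map Prod.fst).Nodup := by
  rw [List.map_flatMap]
  rw [List.nodup_flatMap]
  refine ⟨fun r _ => ?_, ?_⟩
  · unfold pvBlockA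
    rw [List.map_map]
    refine (pv_nodup_pvPA _).map_on ?_
    intro p hp q hq hpq
    have hmp := (pv_mem_pvPA _ p).mp hp
    have hmq := (pv_mem_pvPA _ q).mp hq
    have := pvKey_inj r.1 r.1 p.1 p.2 q.1 q.2 hmp.1 hmp.2.2.1 hmq.1 hmq.2.2.1 hpq
    exact Prod.ext this.2.1 this.2.2
  · have hne : ratings.Pairwise (fun r r2 => r.1 ≠ r2.1) := by
      rw [List.Nodup, List.pairwise_map] at h
      exact h
    refine List.Pairwise.imp_of_mem ?_ hne
    intro r r2 _ _ hner a ha ha2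
    unfold pvBlockA at ha ha2
    simp only [List.map_map, List.mem_map] at ha ha2
    obtain ⟨p, hp, rfl⟩ := ha
    obtain ⟨q, hq, hk⟩ := ha2
    have hmp := (pv_mem_pvPA _ p).mp hp
    have hmq := (pv_mem_pvPA _ q).mp hq
    have := pvKey_inj r2.1 r.1 q.1 q.2 p.1 p.2 hmq.1 hmq.2.2.1 hmp.1 hmp.2.2.1 hk
    exact hner this.1.symm

-- ===== VERDICT (by name: the statement is the Claim_ definition above) =====
theorem ratings_to_comparisons_spec : Claim_equal_ratings_to_comparisons := by
  intro ratings _hdom hpre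
  unfold Spec_ratings_to_comparisons
  unfold ratings_to_comparisons ratings_to_comparisons_alt
  have hAkeys := pv_keysA_nodup ratings hpre
  have hperm : (ratings.flatMap pvBlockA).Perm (ratings.flatMap pvBlockB) :=
    List.Perm.flatMap (List.Perm.refl ratings) (fun r _ => pv_blockA_perm_blockB r)
  have hBkeys : ((ratings.flatMap pvBlockB).map Prod.fst).Nodup :=
    ((hperm.map Prod.fst).nodup_iff).mp hAkeys
  have hitemsA : (pvLoopA ratings).items = ratings.flatMap pvBlockA := by
    rw [pv_loopA_shape]
    have := pv_items_foldl pvBlockA ratings PySem.Dict.empty (by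
      simpa [PySem.Dict.keys, PySem.Dict.empty, PySem.Dict.items] using hAkeys)
    simpa [PySem.Dict.empty, PySem.Dict.items] using this
  have hitemsB : (pvLoopB ratings).items = ratings.flatMap pvBlockB := by
    rw [pv_loopB_shape]
    have := pv_items_foldl pvBlockB ratings PySem.Dict.empty (by
      simpa [PySem.Dict.keys, PySem.Dict.empty, PySem.Dict.items] using hBkeys)
    simpa [PySem.Dict.empty, PySem.Dict.items] using this
  rw [hitemsA, hitemsB]
  -- both sides sort key-distinct permutations of each other: they agree
  set S := PySem.List.sorted (ratings.flatMap pvBlockA) (fun p => p.1)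
  have hSperm : S.Perm (ratings.flatMap pvBlockA) :=
    PySem.List.sorted_perm _ _ _
  have hSle : S.Pairwise (fun a b => a.1 ≤ b.1) := PySem.List.sorted_pairwise _ _
  have hSnodup : (S.map Prod.fst).Nodup := ((hSperm.map Prod.fst).nodup_iff).mpr hAkeys
  have hSne : S.Pairwise (fun a b => a.1 ≠ b.1) := by
    rw [List.Nodup, List.pairwise_map] at hSnodup
    exact hSnodup
  have hSlt : S.Pairwise (fun a b => a.1 < b.1) :=
    (hSle.and hSne).imp (fun h => lt_of_le_of_ne h.1 h.2)
  exact (PySem.List.sorted_eq_of_perm_of_pairwise_lt (ratings.flatMap pvBlockB) S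
    (fun p => p.1) (hSperm.trans hperm) hSlt).symm
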